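-- pv_equiv track=rewrite | github.com/ldwlgus12/algorithm | 백준/Silver/9507. Generations of Tribbles/Generations of Tribbles.py | koong
-- ===== SOURCE A (Python) =====
-- dp = [0] * 68
--
-- def koong(n):
--     if n < 2:
--         return 1
--     if n == 2:
--         return 2
--     if n == 3:
--         return 4
--     if dp[n]:
--         return dp[n]
--
--     dp[n] = koong(n-1) + koong(n-2) + koong(n-3) + koong(n-4)
--     return dp[n]
-- ===== SOURCE B (Python) =====
-- def koong(n):
--     if n < 2:
--         return 1
--     if n == 2:
--         return 2
--     if n == 3:
--         return 4
--     a, b, c, d = 1, 1, 2, 4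
--     for _ in range(4, n + 1):
--         a, b, c, d = b, c, d, a + b + c + d
--     return d
-- ===== Notes on version B (the rewrite author's own statement) =====
-- stated objective: simpler
-- what changed: Replaces the memoized recursion over a 68-slot global table with an iterative bottom-up loop over four rolling variables; no global state, no recursion.
-- outside the precondition, e.g. on koong(68): A raises IndexError, B returns 13603394248202156068
import Mathlib
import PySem

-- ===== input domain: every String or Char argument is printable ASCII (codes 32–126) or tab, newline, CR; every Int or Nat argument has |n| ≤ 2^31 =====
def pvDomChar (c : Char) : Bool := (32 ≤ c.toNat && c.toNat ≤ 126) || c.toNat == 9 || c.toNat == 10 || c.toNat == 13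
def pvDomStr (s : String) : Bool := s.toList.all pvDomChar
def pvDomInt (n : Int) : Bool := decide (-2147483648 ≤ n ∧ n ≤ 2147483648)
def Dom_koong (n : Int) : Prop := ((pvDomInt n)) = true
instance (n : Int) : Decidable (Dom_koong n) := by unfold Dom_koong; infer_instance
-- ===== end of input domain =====

-- B replaces A's memoized recursion over a 68-slot global table with a bottom-up
-- loop over four rolling variables (objective: simpler; no global state, no recursion).

-- ===== PORT A =====
-- A memoizes in the global 68-slot list dp (dp[n] is 0 = "not cached" or the cached
-- positive value); we model the cache as a Dict threaded through the recursion, which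
-- is exact on Pre_ (n ≤ 67, where dp[n] does not raise IndexError). dp starts all-zero
-- at module load → Dict.empty at each top-level call (re-using a warm cache returns the
-- same values, so this is observationally identical).
def koongGo (d : PySem.Dict Int Int) (n : Int) : PySem.Dict Int Int × Int :=
  if n < 2 then (d, 1)
  else if n = 2 then (d, 2)
  else if n = 3 then (d, 4)
  else
    match d.get? n with
    | some v => (d, v)
    | none =>
      let p1 := koongGo d (n-1)
      let p2 := koongGo p1.1 (n-2)
      let p3 := koongGo p2.1 (n-3)
      let p4 := koongGo p3.1 (n-4)
      let v := p1.2 + p2.2 + p3.2 + p4.2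
      (p4.1.insert n v, v)
  termination_by n.toNat
  decreasing_by all_goals omega

def koong (n : Int) : Int := (koongGo PySem.Dict.empty n).2

-- ===== PORT B =====
def koong_alt (n : Int) : Int :=
  if n < 2 then 1
  else if n = 2 then 2
  else if n = 3 then 4
  else
    ((PySem.List.pyRange 4 (n+1) 1).foldl
      (fun (s : Int × Int × Int × Int) _ =>
        (s.2.1, s.2.2.1, s.2.2.2, s.1 + s.2.1 + s.2.2.1 + s.2.2.2))
      (1, 1, 2, 4)).2.2.2

-- ===== PRECONDITION & SPEC =====
-- Pre_ excludes n ≥ 68, where A raises IndexError (its memo list has exactly 68 slots).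
def Pre_koong (n : Int) : Prop := n ≤ 67
instance (n : Int) : Decidable (Pre_koong n) := by unfold Pre_koong; infer_instance
def pvWitness_koong : Int := 10

def Spec_koong (n : Int) (out : Int) : Prop := out = koong_alt n
instance (n : Int) (out : Int) : Decidable (Spec_koong n out) := by unfold Spec_koong; infer_instance

-- ===== CLAIM (what is proved, stated in full; the proofs are below) =====
def Claim_equal_koong : Prop := ∀ (n : Int), Dom_koong n → Pre_koong n → Spec_koong n (koong n)

-- ===== LEMMAS AND PROOFS =====

-- The mathematical recurrence both programs compute.
def koongF (n : Int) : Int :=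
  if n < 2 then 1
  else if n = 2 then 2
  else if n = 3 then 4
  else koongF (n-1) + koongF (n-2) + koongF (n-3) + koongF (n-4)
  termination_by n.toNat
  decreasing_by all_goals omega

-- A's memoized recursion computes koongF, provided every cache entry is correct.
theorem koongGo_correct : ∀ (m : Nat) (n : Int), n.toNat ≤ m →
    ∀ d : PySem.Dict Int Int, (∀ k v, d.get? k = some v → v = koongF k) →
    (koongGo d n).2 = koongF n ∧
      (∀ k v, (koongGo d n).1.get? k = some v → v = koongF k) := by
  intro m
  induction m with
  | zero =>
    intro n hn d hd
    have h : n < 2 := by omega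
    rw [koongGo, koongF]; simp [h]; exact hd
  | succ m ih =>
    intro n hn d hd
    rw [koongGo]
    by_cases h1 : n < 2
    · rw [koongF]; simp [h1]; exact hd
    · by_cases h2 : n = 2
      · rw [koongF]; simp [h1, h2]; exact hd
      · by_cases h3 : n = 3
        · rw [koongF]; simp [h1, h2, h3]; exact hd
        · simp only [if_neg h1, if_neg h2, if_neg h3]
          have hkoongF : koongF n = koongF (n-1) + koongF (n-2) + koongF (n-3) + koongF (n-4) := by
            rw [koongF]; simp only [if_neg h1, if_neg h2, if_neg h3]
          cases hv : d.get? n with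
          | some v =>
            simp only [hv]
            exact ⟨hd n v hv, hd⟩
          | none =>
            simp only [hv]
            obtain ⟨e1, i1⟩ := ih (n-1) (by omega) d hd
            obtain ⟨e2, i2⟩ := ih (n-2) (by omega) _ i1
            obtain ⟨e3, i3⟩ := ih (n-3) (by omega) _ i2
            obtain ⟨e4, i4⟩ := ih (n-4) (by omega) _ i3
            constructor
            · show (koongGo d (n-1)).2
                + (koongGo (koongGo d (n-1)).1 (n-2)).2
                + (koongGo (koongGo (koongGo d (n-1)).1 (n-2)).1 (n-3)).2
                + (koongGo (koongGo (koongGo (koongGo d (n-1)).1 (n-2)).1 (n-3)).1 (n-4)).2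
                = koongF n
              rw [e1, e2, e3, e4, hkoongF]
            · show ∀ k v,
                ((koongGo (koongGo (koongGo (koongGo d (n-1)).1 (n-2)).1 (n-3)).1 (n-4)).1.insert n
                  ((koongGo d (n-1)).2
                    + (koongGo (koongGo d (n-1)).1 (n-2)).2
                    + (koongGo (koongGo (koongGo d (n-1)).1 (n-2)).1 (n-3)).2
                    + (koongGo (koongGo (koongGo (koongGo d (n-1)).1 (n-2)).1 (n-3)).1 (n-4)).2)).get? k
                  = some v → v = koongF k
              intro k v hk
              rw [PySem.Dict.get?_insert] at hk
              by_cases hkn : k = n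
              · subst hkn
                rw [if_pos rfl] at hk
                rw [← Option.some_inj.mp hk, e1, e2, e3, e4, hkoongF]
              · rw [if_neg hkn] at hk
                exact i4 k v hk

theorem koong_eq_koongF (n : Int) : koong n = koongF n := by
  exact (koongGo_correct n.toNat n le_rfl PySem.Dict.empty (by simp [PySem.Dict.get?_empty])).1

theorem alt_loop (n : Int) (h : 3 ≤ n) :
    (PySem.List.pyRange 4 (n+1) 1).foldl
      (fun (s : Int × Int × Int × Int) _ =>
        (s.2.1, s.2.2.1, s.2.2.2, s.1 + s.2.1 + s.2.2.1 + s.2.2.2))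
      (1, 1, 2, 4)
    = (koongF (n-3), koongF (n-2), koongF (n-1), koongF n) := by
  induction n, h using Int.le_induction with
  | base =>
    rw [PySem.List.pyRange_one_eq_nil (by omega)]
    simp only [List.foldl_nil]
    have c0 : koongF 0 = 1 := by rw [koongF]; norm_num
    have c1 : koongF 1 = 1 := by rw [koongF]; norm_num
    have c2 : koongF 2 = 2 := by rw [koongF]; norm_num
    have c3 : koongF 3 = 4 := by rw [koongF]; norm_num
    rw [show (3:Int)-3 = 0 by ring, show (3:Int)-2 = 1 by ring,
        show (3:Int)-1 = 2 by ring, c0, c1, c2, c3]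
  | succ m hm ih =>
    rw [show m + 1 + 1 = (m+1) + 1 by ring,
        PySem.List.pyRange_one_succ_right (by omega : (4:Int) ≤ m+1),
        List.foldl_append, ih]
    simp only [List.foldl_cons, List.foldl_nil]
    have h4 : koongF (m+1) = koongF m + koongF (m-1) + koongF (m-2) + koongF (m-3) := by
      rw [koongF]
      rw [if_neg (by omega), if_neg (by omega), if_neg (by omega)]
      rw [show m+1-1 = m by ring, show m+1-2 = m-1 by ring,
          show m+1-3 = m-2 by ring, show m+1-4 = m-3 by ring]
    rw [show m+1-3 = m-2 by ring, show m+1-2 = m-1 by ring, show m+1-1 = m by ring, h4]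
    simp only [Prod.mk.injEq, true_and]
    ring

theorem koong_alt_eq_koongF (n : Int) : koong_alt n = koongF n := by
  unfold koong_alt
  by_cases h1 : n < 2
  · rw [koongF]; simp [h1]
  · by_cases h2 : n = 2
    · rw [koongF]; simp [h1, h2]
    · by_cases h3 : n = 3
      · rw [koongF]; simp [h1, h2, h3]
      · rw [if_neg h1, if_neg h2, if_neg h3, alt_loop n (by omega)]

-- ===== VERDICT (by name: the statement is the Claim_ definition above) =====
theorem koong_spec : Claim_equal_koong := by
  intro n _ _
  unfold Spec_koong
  rw [koong_eq_koongF, koong_alt_eq_koongF]
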